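-- pv_equiv track=rewrite | github.com/Colin-the/multiset | parent_tree_shorthand.py | parent_of_shorthand
-- ===== SOURCE A (Python) =====
-- from typing import Dict, List, Tuple
--
-- def full_form(short_seq: Tuple[int, ...], m: int) -> List[int]:
--     """Restore full k-length vector from shorthand representation."""
--     return list(short_seq) + [m - sum(short_seq)]
--
-- def to_shorthand(full_seq: List[int]) -> Tuple[int, ...]:
--     """Convert full k-length vector to shorthand (drop last element)."""
--     return tuple(full_seq[:-1])
--
-- def get_representative_shorthand(seq: Tuple[int, ...], m: int) -> Tuple[int, ...]:
--     """
--     Return the lexicographically greatest rotation of the full k-length vector,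
--     then convert back to shorthand.
--     """
--     full = full_form(seq, m)
--     k = len(full)
--     # generate all rotations of full
--     rotations = (tuple(full[i:] + full[:i]) for i in range(k))
--     best = max(rotations)
--     return to_shorthand(list(best))
--
-- def parent_of_shorthand(rep: Tuple[int, ...], m: int) -> Tuple[int, ...]:
--     """
--     Apply the parent-rule to the full vector reconstructed from shorthand,
--     then re-normalize (get representative) and return shorthand.
--     """
--     full = full_form(rep, m)
--     k = len(full)
--     arr = list(full)
--     # find rightmost positive entry
--     i = max(idx for idx, v in enumerate(arr) if v > 0)
--     arr[i] -= 1
--     left = (i - 1) % k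
--     arr[left] += 1
--     # normalize and return
--     return get_representative_shorthand(to_shorthand(arr), m)
-- ===== SOURCE B (Python) =====
-- def parent_of_shorthand(rep, m):
--     """Parent rule + greatest-rotation normalization, via the O(k) two-candidate
--     elimination algorithm for the lexicographically greatest rotation."""
--     full = list(rep) + [m - sum(rep)]
--     k = len(full)
--     # rightmost positive entry, scanning from the right
--     i = next(j for j in reversed(range(k)) if full[j] > 0)
--     full[i] -= 1
--     full[(i - 1) % k] += 1
--     # greatest rotation start via two-candidate elimination on the doubled list
--     s = full + full
--     b, c = 0, 1          # best candidate so far, current challenger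
--     while c < k:
--         t = 0
--         while t < k and s[b + t] == s[c + t]:
--             t += 1
--         if t == k or s[b + t] > s[c + t]:
--             c = c + t + 1
--         else:
--             b, c = c, max(c + 1, b + t + 1)
--     return tuple(s[b:b + k - 1])
-- ===== Notes on version B (the rewrite author's own statement) =====
-- stated objective: faster
-- what changed: B finds the lexicographically greatest rotation with the linear-time two-candidate elimination algorithm on the doubled vector (and finds the rightmost positive entry by a right-to-left scan), instead of materializing all k rotations and taking max over them.
import Mathlib
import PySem

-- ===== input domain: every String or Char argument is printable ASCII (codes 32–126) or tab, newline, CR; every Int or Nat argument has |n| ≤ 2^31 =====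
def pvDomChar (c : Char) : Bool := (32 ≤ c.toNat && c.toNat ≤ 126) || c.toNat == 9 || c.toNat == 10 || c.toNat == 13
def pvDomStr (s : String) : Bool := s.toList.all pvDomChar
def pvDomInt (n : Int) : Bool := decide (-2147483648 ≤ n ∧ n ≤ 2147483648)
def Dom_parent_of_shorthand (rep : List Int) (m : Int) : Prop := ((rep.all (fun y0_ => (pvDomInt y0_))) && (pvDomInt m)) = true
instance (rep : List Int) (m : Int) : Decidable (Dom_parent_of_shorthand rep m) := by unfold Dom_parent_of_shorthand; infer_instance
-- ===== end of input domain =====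

-- B replaces A's "materialize all k rotations and take the max" normalization (O(k^2)) by the
-- linear-time two-candidate elimination algorithm for the lexicographically greatest rotation.


-- ===== PORT A =====
def pvFullForm (short_seq : List Int) (m : Int) : List Int :=
  short_seq ++ [m - short_seq.sum]

def pvToShorthand (full_seq : List Int) : List Int :=
  PySem.List.slice full_seq none (some (-1))

def pvGetRepShorthand (seq : List Int) (m : Int) : List Int :=
  let full := pvFullForm seq m
  let k := full.length
  let rotations := (PySem.List.pyRange 0 (k : Int) 1).map
    (fun i => PySem.List.slice full (some i) none ++ PySem.List.slice full none (some i))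
  match PySem.List.max? rotations (fun x => x) with
  | some best => pvToShorthand best
  | none => []   -- unreachable: full is nonempty, so there is at least one rotation

def parent_of_shorthand (rep : List Int) (m : Int) : List Int :=
  let full := pvFullForm rep m
  let k := (full.length : Int)
  let arr := full
  match PySem.List.max?
      (((PySem.List.enumerate arr).filter (fun p => decide (0 < p.2))).map (fun p => p.1))
      (fun x => x) with
  | none => []   -- Python raises ValueError here (max of empty generator); excluded by Pre_
  | some i =>
    let arr1 := PySem.List.pySetD arr i (PySem.List.pyGetD arr i 0 - 1)
    let left := PySem.Int.mod (i - 1) k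
    let arr2 := PySem.List.pySetD arr1 left (PySem.List.pyGetD arr1 left 0 + 1)
    pvGetRepShorthand (pvToShorthand arr2) m

-- ===== PORT B =====
-- inner while of Source B: the first t with t = k or s[b+t] != s[c+t]
def pvMismatch (s : List Int) (k b c t : Nat) : Nat :=
  if _h : t < k ∧ s.getD (b + t) 0 = s.getD (c + t) 0 then pvMismatch s k b c (t + 1) else t
termination_by k - t

-- outer while of Source B: two-candidate elimination for the greatest-rotation start index
def pvBestStart (s : List Int) (k b c : Nat) : Nat :=
  if _h : c < k then
    let t := pvMismatch s k b c 0
    if t = k ∨ s.getD (c + t) 0 < s.getD (b + t) 0 then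
      pvBestStart s k b (c + t + 1)
    else
      pvBestStart s k c (max (c + 1) (b + t + 1))
  else b
termination_by k - c
decreasing_by
  · omega
  · omega

def parent_of_shorthand_alt (rep : List Int) (m : Int) : List Int :=
  let full := rep ++ [m - rep.sum]
  let k := full.length
  match (List.range k).reverse.find? (fun j => decide (0 < full.getD j 0)) with
  | none => []   -- Python raises StopIteration here (next on empty generator); excluded by Pre_
  | some i =>
    let full1 := full.set i (full.getD i 0 - 1)
    let left := (PySem.Int.mod ((i : Int) - 1) (k : Int)).toNat
    let full2 := full1.set left (full1.getD left 0 + 1)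
    let s := full2 ++ full2
    let b := pvBestStart s k 0 1
    (s.drop b).take (k - 1)

-- ===== PRECONDITION & SPEC =====
-- Pre_ excludes exactly the inputs whose reconstructed full vector rep ++ [m - sum(rep)] has no
-- positive entry: there Python A raises ValueError (max() of an empty generator).
def Pre_parent_of_shorthand (rep : List Int) (m : Int) : Prop :=
  0 < m - rep.sum ∨ ∃ v ∈ rep, 0 < v
instance (rep : List Int) (m : Int) : Decidable (Pre_parent_of_shorthand rep m) := by
  unfold Pre_parent_of_shorthand; infer_instance

def pvWitness_parent_of_shorthand : List Int × Int := ([1, 0], 3)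

def Spec_parent_of_shorthand (rep : List Int) (m : Int) (out : List Int) : Prop := out = parent_of_shorthand_alt rep m
instance (rep : List Int) (m : Int) (out : List Int) : Decidable (Spec_parent_of_shorthand rep m out) := by unfold Spec_parent_of_shorthand; infer_instance

-- ===== CLAIM (what is proved, stated in full; the proofs are below) =====
def Claim_equal_parent_of_shorthand : Prop := ∀ (rep : List Int) (m : Int), Dom_parent_of_shorthand rep m → Pre_parent_of_shorthand rep m → Spec_parent_of_shorthand rep m (parent_of_shorthand rep m)

-- ===== LEMMAS AND PROOFS =====

-- the cyclic entry function and the rotation starting at j, both defined for every j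
def pvF (arr : List Int) (j : Nat) : Int := arr.getD (j % arr.length) 0
def pvRotF (arr : List Int) (j : Nat) : List Int :=
  (List.range arr.length).map (fun e => pvF arr (j + e))

theorem pvMax?_inst (L : List (List Int)) :
    PySem.List.max? L (fun x : List Int => x)
    = @PySem.List.max? (List Int) (List Int) List.instLT LinearOrder.toDecidableLT L (fun x => x) :=
  congrArg (fun inst => @PySem.List.max? (List Int) (List Int) List.instLT inst L (fun x => x))
    (funext fun a => funext fun b => Subsingleton.elim _ _)

theorem pvRotF_congr (arr : List Int) (x y : Nat)
    (h : ∀ d < arr.length, pvF arr (x + d) = pvF arr (y + d)) : pvRotF arr x = pvRotF arr y := by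
  unfold pvRotF
  exact List.map_congr_left (fun e he => h e (List.mem_range.mp he))

theorem pvRotF_mod (arr : List Int) (j : Nat) : pvRotF arr (j % arr.length) = pvRotF arr j := by
  apply pvRotF_congr
  intro d _
  simp [pvF, Nat.add_mod, Nat.mod_mod_of_dvd]

theorem pvS_getD (arr : List Int) (j : Nat) (hj : j < 2 * arr.length) :
    (arr ++ arr).getD j 0 = pvF arr j := by
  unfold pvF
  rcases Nat.lt_or_ge j arr.length with h | h
  · rw [Nat.mod_eq_of_lt h]
    rw [List.getD_eq_getElem?_getD, List.getD_eq_getElem?_getD,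
      List.getElem?_append_left h]
  · have h2 : j - arr.length < arr.length := by omega
    have hm : j % arr.length = j - arr.length := by
      conv_lhs => rw [show j = (j - arr.length) + 1 * arr.length by omega]
      rw [Nat.add_mul_mod_self_right, Nat.mod_eq_of_lt h2]
    rw [hm, List.getD_eq_getElem?_getD, List.getD_eq_getElem?_getD,
      List.getElem?_append_right h]

theorem pvRotF_eq_rotL (arr : List Int) (j : Nat) (hj : j < arr.length) :
    pvRotF arr j = arr.drop j ++ arr.take j := by
  apply List.ext_getElem
  · simp [pvRotF]; omega
  · intro e h1 h2
    simp only [pvRotF, List.getElem_map, List.getElem_range]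
    have hlen : arr.length ≠ 0 := by omega
    simp only [pvRotF, List.length_map, List.length_range] at h1
    rcases Nat.lt_or_ge e (arr.length - j) with h | h
    · rw [List.getElem_append_left (by rw [List.length_drop]; omega)]
      have : (j + e) % arr.length = j + e := Nat.mod_eq_of_lt (by omega)
      simp only [pvF, this, List.getD_eq_getElem?_getD]
      rw [List.getElem?_eq_getElem (by omega)]
      simp
    · rw [List.getElem_append_right (by rw [List.length_drop]; omega)]
      have hm : (j + e) % arr.length = e - (arr.length - j) := by
        conv_lhs => rw [show j + e = (e - (arr.length - j)) + 1 * arr.length by omega]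
        rw [Nat.add_mul_mod_self_right, Nat.mod_eq_of_lt (by omega)]
      simp only [pvF, hm, List.getD_eq_getElem?_getD]
      rw [List.getElem?_eq_getElem (by omega)]
      simp only [Option.getD_some, List.getElem_take]
      simp [List.length_drop]

theorem pvLex_lt (e : Nat) : ∀ (u v : List Int), e < u.length → e < v.length →
    (∀ d < e, u.getD d 0 = v.getD d 0) → u.getD e 0 < v.getD e 0 → u < v := by
  induction e with
  | zero =>
    intro u v hu hv _ hlt
    match u, v with
    | a :: u', b :: v' =>
      simp only [List.getD_cons_zero] at hlt
      exact List.cons_lt_cons_iff.mpr (Or.inl hlt)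
  | succ e ih =>
    intro u v hu hv hpre hlt
    match u, v with
    | a :: u', b :: v' =>
      have h0 : a = b := by have := hpre 0 (Nat.succ_pos e); simpa using this
      subst h0
      apply List.cons_lt_cons_iff.mpr
      refine Or.inr ⟨rfl, ?_⟩
      apply ih u' v' (by simpa using hu) (by simpa using hv)
      · intro d hd
        have := hpre (d + 1) (by omega)
        simpa using this
      · simpa using hlt

theorem pvRotF_getD (arr : List Int) (x d : Nat) (hd : d < arr.length) :
    (pvRotF arr x).getD d 0 = pvF arr (x + d) := by
  unfold pvRotF
  rw [List.getD_eq_getElem?_getD, List.getElem?_map, List.getElem?_range hd]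
  simp


theorem pvMismatch_spec (s : List Int) (k b c : Nat) : ∀ t0, t0 ≤ k →
    (t0 ≤ pvMismatch s k b c t0 ∧ pvMismatch s k b c t0 ≤ k ∧
    (∀ d, t0 ≤ d → d < pvMismatch s k b c t0 → s.getD (b + d) 0 = s.getD (c + d) 0) ∧
    (pvMismatch s k b c t0 = k ∨
      s.getD (b + pvMismatch s k b c t0) 0 ≠ s.getD (c + pvMismatch s k b c t0) 0)) := by
  have main : ∀ n t0, k - t0 ≤ n → t0 ≤ k →
      (t0 ≤ pvMismatch s k b c t0 ∧ pvMismatch s k b c t0 ≤ k ∧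
      (∀ d, t0 ≤ d → d < pvMismatch s k b c t0 → s.getD (b + d) 0 = s.getD (c + d) 0) ∧
      (pvMismatch s k b c t0 = k ∨
        s.getD (b + pvMismatch s k b c t0) 0 ≠ s.getD (c + pvMismatch s k b c t0) 0)) := by
    intro n
    induction n with
    | zero =>
      intro t0 hn ht
      have ht0 : t0 = k := by omega
      subst ht0
      rw [pvMismatch, dif_neg (fun hh => lt_irrefl _ hh.1)]
      exact ⟨le_refl _, le_refl _, by omega, Or.inl rfl⟩;
    | succ n ih =>
      intro t0 hn ht
      rw [pvMismatch]
      by_cases h : t0 < k ∧ s.getD (b + t0) 0 = s.getD (c + t0) 0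
      · rw [dif_pos h]
        obtain ⟨ih1, ih2, ih3, ih4⟩ := ih (t0 + 1) (by omega) (by omega)
        refine ⟨by omega, ih2, ?_, ih4⟩
        intro d hd1 hd2
        rcases Nat.eq_or_lt_of_le hd1 with rfl | hlt
        · exact h.2
        · exact ih3 d hlt hd2
      · rw [dif_neg h]
        refine ⟨le_refl _, ht, by omega, ?_⟩
        by_cases hk : t0 = k
        · exact Or.inl hk
        · exact Or.inr (fun he => h ⟨by omega, he⟩)
  exact fun t0 ht => main (k - t0) t0 (le_refl _) ht

theorem pvRotF_length (arr : List Int) (x : Nat) : (pvRotF arr x).length = arr.length := by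
  simp [pvRotF]

-- strict lexicographic comparison of rotations from a first difference of pvF
theorem pvRotF_lt (arr : List Int) (x y e : Nat) (he : e < arr.length)
    (hpre : ∀ d < e, pvF arr (x + d) = pvF arr (y + d))
    (hlt : pvF arr (x + e) < pvF arr (y + e)) : pvRotF arr x < pvRotF arr y := by
  apply pvLex_lt e _ _ (by rw [pvRotF_length]; exact he) (by rw [pvRotF_length]; exact he)
  · intro d hd
    rw [pvRotF_getD arr x d (by omega), pvRotF_getD arr y d (by omega)]
    exact hpre d hd
  · rw [pvRotF_getD arr x e he, pvRotF_getD arr y e he]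
    exact hlt

-- a position attaining the maximum rotation exists
theorem pvAttainer (arr : List Int) (hne : arr ≠ []) :
    ∃ p, p < arr.length ∧ ∀ q, q < arr.length → pvRotF arr q ≤ pvRotF arr p := by
  have hk : 0 < arr.length := List.length_pos_iff.mpr hne
  have hL : (List.range arr.length).map (pvRotF arr) ≠ [] := by
    simp [List.map_eq_nil_iff, List.range_eq_nil]; omega
  cases hM : @PySem.List.max? (List Int) (List Int) List.instLT LinearOrder.toDecidableLT
      ((List.range arr.length).map (pvRotF arr)) (fun x => x) with
  | none => exact absurd ((@PySem.List.max?_eq_none_iff (List Int) (List Int) List.instLT LinearOrder.toDecidableLT _ _).mp hM) hL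
  | some M =>
    have hmem := @PySem.List.max?_mem (List Int) (List Int) List.instLT LinearOrder.toDecidableLT _ _ _ hM
    rcases List.mem_map.mp hmem with ⟨p, hp, rfl⟩
    refine ⟨p, List.mem_range.mp hp, ?_⟩
    intro q hq
    exact PySem.List.max?_isMax hM (pvRotF arr q) (List.mem_map_of_mem (List.mem_range.mpr hq))

-- elimination: an agreeing stretch then a strict difference dominates the whole stretch
theorem pvElim (arr : List Int) (x y t : Nat)
    (ht : t < arr.length)
    (hpre : ∀ d < t, pvF arr (x + d) = pvF arr (y + d))
    (hlt : pvF arr (y + t) < pvF arr (x + t)) :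
    ∀ d ≤ t, pvRotF arr (y + d) < pvRotF arr (x + d) := by
  intro d hd
  apply pvRotF_lt arr (y + d) (x + d) (t - d) (by omega)
  · intro d' hd'
    have h := hpre (d + d') (by omega)
    have e1 : y + d + d' = y + (d + d') := by omega
    have e2 : x + d + d' = x + (d + d') := by omega
    rw [e1, e2]
    exact h.symm
  · have h1 : y + d + (t - d) = y + t := by omega
    have h2 : x + d + (t - d) = x + t := by omega
    rw [h1, h2]; exact hlt

theorem pvBestStart_eq_pos (s : List Int) (k b c : Nat) (hc : c < k) :
    pvBestStart s k b c =
    (if pvMismatch s k b c 0 = k ∨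
        s.getD (c + pvMismatch s k b c 0) 0 < s.getD (b + pvMismatch s k b c 0) 0 then
      pvBestStart s k b (c + pvMismatch s k b c 0 + 1)
    else
      pvBestStart s k c (max (c + 1) (b + pvMismatch s k b c 0 + 1))) := by
  rw [pvBestStart, dif_pos hc]

theorem pvBestStart_eq_neg (s : List Int) (k b c : Nat) (hc : ¬ c < k) :
    pvBestStart s k b c = b := by
  rw [pvBestStart, dif_neg hc]

-- a length-long agreement of pvF extends to full agreement (periodicity)
theorem pvFext (arr : List Int) (hne : arr ≠ []) (b c : Nat)
    (h : ∀ d < arr.length, pvF arr (b + d) = pvF arr (c + d)) :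
    ∀ x, pvF arr (b + x) = pvF arr (c + x) := by
  have hk : 0 < arr.length := List.length_pos_iff.mpr hne
  intro x
  have h1 : ∀ y : Nat, pvF arr (y + x) = pvF arr (y + x % arr.length) := by
    intro y
    unfold pvF
    rw [Nat.add_mod y x, Nat.add_mod y (x % arr.length), Nat.mod_mod_of_dvd _ dvd_rfl]
  rw [h1 b, h1 c]
  exact h (x % arr.length) (Nat.mod_lt _ hk)

-- descent towards the window [b, c) when rotations repeat with period c - b
theorem pvDescent (arr : List Int) (b c : Nat) (hbc : b < c)
    (hR : ∀ x, pvRotF arr (b + x) = pvRotF arr (c + x)) :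
    ∀ p, b ≤ p → ∃ q, b ≤ q ∧ q < c ∧ pvRotF arr q = pvRotF arr p := by
  intro p
  induction p using Nat.strong_induction_on with
  | _ p ih =>
    intro hbp
    by_cases hpc : p < c
    · exact ⟨p, hbp, hpc, rfl⟩
    · have hcp : c ≤ p := by omega
      have hstep : pvRotF arr (p - (c - b)) = pvRotF arr p := by
        have h1 := hR (p - c)
        have e1 : b + (p - c) = p - (c - b) := by omega
        have e2 : c + (p - c) = p := by omega
        rw [e1, e2] at h1
        exact h1
      obtain ⟨q, hq1, hq2, hq3⟩ := ih (p - (c - b)) (by omega) (by omega)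
      exact ⟨q, hq1, hq2, by rw [hq3, hstep]⟩

-- the final maximality argument at loop exit
theorem pvExit (arr : List Int) (hne : arr ≠ []) (b c : Nat) (hbk : b < arr.length)
    (hkc : arr.length ≤ c)
    (hinv : ∀ p, p < c → p < arr.length → p ≠ b →
      ∃ q, q < arr.length ∧ pvRotF arr p < pvRotF arr q) :
    ∀ p, p < arr.length → pvRotF arr p ≤ pvRotF arr b := by
  intro p hp
  obtain ⟨pm, hpm, hmax⟩ := pvAttainer arr hne
  rcases eq_or_ne pm b with rfl | hne2
  · exact hmax p hp
  · obtain ⟨q, hq, hlt⟩ := hinv pm (by omega) hpm hne2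
    exact absurd (hmax q hq) (not_le.mpr hlt)

theorem pvBestStart_max (arr : List Int) (hne : arr ≠ []) :
    ∀ (n b c : Nat), arr.length - c ≤ n → b < c → b < arr.length →
    (∀ p, p < c → p < arr.length → p ≠ b →
      ∃ q, q < arr.length ∧ pvRotF arr p < pvRotF arr q) →
    (pvBestStart (arr ++ arr) arr.length b c < arr.length ∧
      ∀ p, p < arr.length → pvRotF arr p ≤ pvRotF arr (pvBestStart (arr ++ arr) arr.length b c)) := by
  have hk : 0 < arr.length := List.length_pos_iff.mpr hne
  intro n
  induction n with
  | zero =>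
    intro b c hn hbc hbk hinv
    rw [pvBestStart_eq_neg _ _ _ _ (by omega)]
    exact ⟨hbk, pvExit arr hne b c hbk (by omega) hinv⟩
  | succ n ih =>
    intro b c hn hbc hbk hinv
    by_cases hc : c < arr.length
    · obtain ⟨-, htk, hteq, htend⟩ := pvMismatch_spec (arr ++ arr) arr.length b c 0 (by omega)
      set t := pvMismatch (arr ++ arr) arr.length b c 0 with hT
      have hfeq : ∀ d < t, pvF arr (b + d) = pvF arr (c + d) := by
        intro d hd
        rw [← pvS_getD arr (b + d) (by omega), ← pvS_getD arr (c + d) (by omega)]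
        exact hteq d (by omega) hd
      rw [pvBestStart_eq_pos _ _ _ _ hc, ← hT]
      by_cases hcond : t = arr.length ∨
          (arr ++ arr).getD (c + t) 0 < (arr ++ arr).getD (b + t) 0
      · rw [if_pos hcond]
        by_cases htk' : t = arr.length
        · -- full match: period c - b, loop will exit with b
          rw [pvBestStart_eq_neg _ _ _ _ (by omega)]
          refine ⟨hbk, ?_⟩
          have hfx : ∀ x, pvF arr (b + x) = pvF arr (c + x) :=
            pvFext arr hne b c (fun d hd => hfeq d (by omega))
          have hRx : ∀ x, pvRotF arr (b + x) = pvRotF arr (c + x) := by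
            intro x
            apply pvRotF_congr
            intro d _
            have := hfx (x + d)
            rw [← Nat.add_assoc, ← Nat.add_assoc] at this
            exact this
          intro p hp
          obtain ⟨pm, hpm, hmax⟩ := pvAttainer arr hne
          rcases eq_or_ne pm b with rfl | hne2
          · exact hmax p hp
          · by_cases hpmc : pm < c
            · obtain ⟨q, hq, hlt⟩ := hinv pm hpmc hpm hne2
              exact absurd (hmax q hq) (not_le.mpr hlt)
            · obtain ⟨q, hq1, hq2, hq3⟩ := pvDescent arr b c hbc hRx pm (by omega)
              rcases eq_or_ne q b with rfl | hqb
              · exact (hmax p hp).trans (le_of_eq hq3.symm)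
              · obtain ⟨r, hr, hltr⟩ := hinv q hq2 (by omega) hqb
                rw [hq3] at hltr
                exact absurd (hmax r hr) (not_le.mpr hltr)
        · -- strict difference in favour of b: eliminate c .. c+t
          have htlt : t < arr.length := by omega
          have hstr : pvF arr (c + t) < pvF arr (b + t) := by
            rw [← pvS_getD arr (c + t) (by omega), ← pvS_getD arr (b + t) (by omega)]
            exact hcond.resolve_left htk'
          have helim := pvElim arr b c t htlt hfeq hstr
          apply ih b (c + t + 1) (by omega) (by omega) hbk
          intro p hp hpk hpb
          by_cases hpc : p < c
          · exact hinv p hpc hpk hpb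
          · have hd : p - c ≤ t := by omega
            have h1 := helim (p - c) hd
            have e1 : c + (p - c) = p := by omega
            rw [e1] at h1
            refine ⟨(b + (p - c)) % arr.length, Nat.mod_lt _ hk, ?_⟩
            rw [pvRotF_mod]
            exact h1
      · rw [if_neg hcond]
        push Not at hcond
        obtain ⟨htk', hnlt⟩ := hcond
        have htlt : t < arr.length := by omega
        have hstr : pvF arr (b + t) < pvF arr (c + t) := by
          rw [← pvS_getD arr (b + t) (by omega), ← pvS_getD arr (c + t) (by omega)]
          exact lt_of_le_of_ne (not_lt.mp (by exact fun h => absurd h (by simpa using hnlt)))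
            (htend.resolve_left htk')
        have helim := pvElim arr c b t htlt (fun d hd => (hfeq d hd).symm) hstr
        apply ih c (max (c + 1) (b + t + 1)) (by omega) (by omega) hc
        intro p hp hpk hpc'
        rcases Nat.lt_trichotomy p c with hpc | rfl | hpc
        · rcases eq_or_ne p b with rfl | hpb
          · refine ⟨c % arr.length, Nat.mod_lt _ hk, ?_⟩
            rw [pvRotF_mod]
            have h0 := helim 0 (Nat.zero_le t)
            simpa using h0
          · exact hinv p hpc hpk hpb
        · exact absurd rfl hpc'
        · have hple : p ≤ b + t := by omega
          have hd : p - b ≤ t := by omega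
          have h1 := helim (p - b) hd
          have e1 : b + (p - b) = p := by omega
          rw [e1] at h1
          refine ⟨(c + (p - b)) % arr.length, Nat.mod_lt _ hk, ?_⟩
          rw [pvRotF_mod]
          exact h1
    · rw [pvBestStart_eq_neg _ _ _ _ hc]
      exact ⟨hbk, pvExit arr hne b c hbk (by omega) hinv⟩

theorem pvFind?_congr {α : Type} (l : List α) (p q : α → Bool) (h : ∀ a ∈ l, p a = q a) :
    l.find? p = l.find? q := by
  induction l with
  | nil => rfl
  | cons x t ih =>
    simp only [List.find?_cons, h x List.mem_cons_self]
    cases q x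
    · exact ih (fun a ha => h a (List.mem_cons_of_mem _ ha))
    · rfl

theorem pvMax?_append_singleton (l : List Int) (a : Int) (h : ∀ y ∈ l, y < a) :
    PySem.List.max? (l ++ [a]) (fun x => x) = some a := by
  cases l with
  | nil => simp [PySem.List.max?_id_cons]
  | cons x t =>
    rw [List.cons_append, PySem.List.max?_id_cons, List.foldl_append]
    simp only [List.foldl_cons, List.foldl_nil]
    have hm : List.foldl max x t < a := by
      rcases PySem.List.foldl_max_mem t x with he | hmem
      · rw [he]; exact h x List.mem_cons_self
      · exact h _ (List.mem_cons_of_mem _ hmem)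
    rw [max_eq_right (le_of_lt hm)]

theorem pvIdx_eq (arr : List Int) :
    PySem.List.max?
      (((PySem.List.enumerate arr).filter (fun p => decide (0 < p.2))).map (fun p => p.1))
      (fun x => x)
    = ((List.range arr.length).reverse.find? (fun j => decide (0 < arr.getD j 0))).map
        (fun j => (j : Int)) := by
  induction arr using List.reverseRecOn with
  | nil => rfl
  | append_singleton xs x ih =>
    rw [PySem.List.enumerate_append]
    simp only [List.length_append, List.length_cons, List.length_nil]
    rw [List.range_succ, List.reverse_append]
    simp only [List.reverse_cons, List.reverse_nil, List.nil_append, List.cons_append,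
      List.nil_append]
    have henum1 : PySem.List.enumerate [x] (0 + (xs.length : Int)) = [((xs.length : Int), x)] := by
      simp [PySem.List.enumerate_cons, PySem.List.enumerate_nil]
    rw [henum1, List.filter_append]
    have hgetD : (xs ++ [x]).getD xs.length 0 = x := by
      rw [List.getD_eq_getElem?_getD, List.getElem?_append_right (le_refl _)]
      simp
    by_cases hx : 0 < x
    · have hfilter : List.filter (fun p => decide (0 < p.2)) [((xs.length : Int), x)]
          = [((xs.length : Int), x)] := by simp [hx]
      rw [hfilter, List.map_append]
      simp only [List.map_cons, List.map_nil]
      rw [pvMax?_append_singleton]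
      · rw [List.find?_cons, hgetD]
        simp [hx]
      · intro y hy
        rcases List.mem_map.mp hy with ⟨p, hp, rfl⟩
        rcases (PySem.List.mem_enumerate_iff xs 0 p).mp (List.mem_of_mem_filter hp) with
          ⟨k, hk, rfl⟩
        simp only
        omega
    · have hfilter : List.filter (fun p => decide (0 < p.2)) [((xs.length : Int), x)] = [] := by
        simp [hx]
      have hdec : decide (0 < x) = false := by simp; omega
      rw [hfilter, List.append_nil]
      simp only [List.find?_cons, hgetD, hdec]
      rw [ih]
      have hfc : List.find? (fun j => decide (0 < (xs ++ [x]).getD j 0))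
            (List.range xs.length).reverse
          = List.find? (fun j => decide (0 < xs.getD j 0)) (List.range xs.length).reverse := by
        apply pvFind?_congr
        intro j hj
        have hjlt : j < xs.length := List.mem_range.mp (List.mem_reverse.mp hj)
        congr 2
        rw [List.getD_eq_getElem?_getD, List.getD_eq_getElem?_getD,
          List.getElem?_append_left hjlt]
      rw [hfc]

theorem pvSum_set (l : List Int) (i : Nat) (v : Int) (h : i < l.length) :
    (l.set i v).sum = l.sum - l.getD i 0 + v := by
  induction l generalizing i with
  | nil => simp at h
  | cons x t ih =>
    cases i with
    | zero => simp [List.set]; ring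
    | succ i =>
      simp only [List.set, List.sum_cons, List.getD_cons_succ]
      rw [ih i (by simpa using h)]
      ring

-- the common update step: decrement position j, increment position (j - 1) mod k
def pvUpd (full : List Int) (j : Nat) : List Int :=
  let f1 := full.set j (full.getD j 0 - 1)
  let L := (PySem.Int.mod ((j : Int) - 1) (full.length : Int)).toNat
  f1.set L (f1.getD L 0 + 1)

theorem pvUpd_length (full : List Int) (j : Nat) : (pvUpd full j).length = full.length := by
  simp [pvUpd]

theorem pvUpd_sum (full : List Int) (j : Nat) (hj : j < full.length) (hk : 0 < full.length) :
    (pvUpd full j).sum = full.sum := by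
  unfold pvUpd
  have hL : (PySem.Int.mod ((j : Int) - 1) (full.length : Int)).toNat < full.length := by
    have h1 := PySem.Int.mod_lt ((j : Int) - 1) (b := (full.length : Int)) (by exact_mod_cast hk)
    have h2 := PySem.Int.mod_nonneg ((j : Int) - 1) (b := (full.length : Int)) (by exact_mod_cast hk)
    omega
  rw [pvSum_set _ _ _ (by simpa using hL), pvSum_set _ _ _ hj]
  ring

theorem pvRestore (l : List Int) (hne : l ≠ []) :
    l.dropLast ++ [l.sum - l.dropLast.sum] = l := by
  conv_rhs => rw [← List.dropLast_append_getLast hne]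
  congr 1
  have : l.sum = l.dropLast.sum + l.getLast hne := by
    conv_lhs => rw [← List.dropLast_append_getLast hne]
    simp
  rw [this]
  simp

theorem pvRotations_eq (arr : List Int) :
    (PySem.List.pyRange 0 (arr.length : Int) 1).map
      (fun i => PySem.List.slice arr (some i) none ++ PySem.List.slice arr none (some i))
    = (List.range arr.length).map (pvRotF arr) := by
  rw [PySem.List.pyRange_zero_natCast, List.map_map]
  apply List.map_congr_left
  intro j hj
  have hjk : j < arr.length := List.mem_range.mp hj
  simp only [Function.comp_apply]
  rw [PySem.List.slice_from_natCast, PySem.List.slice_to_natCast,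
    pvRotF_eq_rotL arr j hjk]

theorem pvSliceRot (arr : List Int) (b : Nat) (hb : b < arr.length) :
    ((arr ++ arr).drop b).take (arr.length - 1) = (pvRotF arr b).dropLast := by
  rw [pvRotF_eq_rotL arr b hb, List.dropLast_eq_take]
  have hlen : (arr.drop b ++ arr.take b).length = arr.length := by simp; omega
  rw [hlen]
  have hdrop : (arr ++ arr).drop b = arr.drop b ++ arr := by
    rw [List.drop_append]
    congr 1
    rw [show b - arr.length = 0 by omega, List.drop_zero]
  rw [hdrop, List.take_append, List.take_append,
    List.take_take]
  congr 1
  rw [List.length_drop]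
  congr 1
  omega

-- the normalization step: A's max-of-all-rotations equals B's two-candidate elimination result
theorem pvRep_eq (arr : List Int) (hne : arr ≠ []) :
    pvGetRepShorthand arr.dropLast arr.sum
    = ((arr ++ arr).drop (pvBestStart (arr ++ arr) arr.length 0 1)).take (arr.length - 1) := by
  have hk : 0 < arr.length := List.length_pos_iff.mpr hne
  obtain ⟨hbk, hmaxB⟩ := pvBestStart_max arr hne arr.length 0 1 (by omega) (by omega) hk
    (fun p hp _ hne0 => absurd (by omega : p = 0) hne0)
  simp only [pvGetRepShorthand, pvFullForm]
  rw [pvRestore arr hne, pvRotations_eq arr, pvMax?_inst]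
  cases hM : @PySem.List.max? (List Int) (List Int) List.instLT LinearOrder.toDecidableLT
      ((List.range arr.length).map (pvRotF arr)) (fun x => x) with
  | none =>
    have hnil := (@PySem.List.max?_eq_none_iff (List Int) (List Int) List.instLT
      LinearOrder.toDecidableLT ((List.range arr.length).map (pvRotF arr)) (fun x => x)).mp hM
    have hnn : (List.range arr.length).map (pvRotF arr) ≠ [] := by
      simp [List.map_eq_nil_iff, List.range_eq_nil]
      omega
    exact absurd hnil hnn
  | some M =>
    have hmem := @PySem.List.max?_mem (List Int) (List Int) List.instLT
      LinearOrder.toDecidableLT _ _ _ hM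
    rcases List.mem_map.mp hmem with ⟨j0, hj0, rfl⟩
    have hj0k : j0 < arr.length := List.mem_range.mp hj0
    have hle1 : pvRotF arr (pvBestStart (arr ++ arr) arr.length 0 1) ≤ pvRotF arr j0 :=
      PySem.List.max?_isMax hM _ (List.mem_map_of_mem (List.mem_range.mpr hbk))
    have hle2 : pvRotF arr j0 ≤ pvRotF arr (pvBestStart (arr ++ arr) arr.length 0 1) :=
      hmaxB j0 hj0k
    have heq : pvRotF arr j0 = pvRotF arr (pvBestStart (arr ++ arr) arr.length 0 1) :=
      le_antisymm hle2 hle1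
    rw [pvSliceRot arr _ hbk, ← heq]
    simp only [pvToShorthand, PySem.List.slice_to_neg_one]

-- ===== VERDICT (by name: the statement is the Claim_ definition above) =====
theorem parent_of_shorthand_spec : Claim_equal_parent_of_shorthand := by
  intro rep m _hdom hpre
  unfold Spec_parent_of_shorthand
  have hk : 0 < (rep ++ [m - rep.sum]).length := by simp
  -- a positive entry exists in the full vector
  have hpos : ∃ i, i < (rep ++ [m - rep.sum]).length ∧ 0 < (rep ++ [m - rep.sum]).getD i 0 := by
    rcases hpre with h | ⟨v, hv, hvpos⟩
    · refine ⟨rep.length, by simp, ?_⟩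
      rw [List.getD_eq_getElem?_getD, List.getElem?_append_right (le_refl _)]
      simpa using h
    · rcases List.mem_iff_getElem.mp hv with ⟨n, hn, rfl⟩
      refine ⟨n, by simp; omega, ?_⟩
      rw [List.getD_eq_getElem?_getD, List.getElem?_append_left hn,
        List.getElem?_eq_getElem hn]
      simpa using hvpos
  -- the scan finds some index j
  obtain ⟨i0, hi0, hp0⟩ := hpos
  have hsome : ((List.range (rep ++ [m - rep.sum]).length).reverse.find?
      (fun j => decide (0 < (rep ++ [m - rep.sum]).getD j 0))).isSome := by
    rw [List.find?_isSome]
    exact ⟨i0, List.mem_reverse.mpr (List.mem_range.mpr hi0), by simpa using hp0⟩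
  obtain ⟨j, hj⟩ := Option.isSome_iff_exists.mp hsome
  have hjk : j < (rep ++ [m - rep.sum]).length :=
    List.mem_range.mp (List.mem_reverse.mp (List.mem_of_find?_eq_some hj))
  have hjpos : (0 : Int) ≤ (j : Int) - 1 + 1 := by omega
  -- reduce A to the common update followed by normalization
  have hA : parent_of_shorthand rep m
      = pvGetRepShorthand (pvToShorthand (pvUpd (rep ++ [m - rep.sum]) j)) m := by
    simp only [parent_of_shorthand, pvFullForm]
    rw [pvIdx_eq, hj]
    simp only [Option.pure_def, Option.bind_eq_bind, Option.bind_some, Option.map_some]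
    have hmodnn := PySem.Int.mod_nonneg ((j : Int) - 1)
      (b := ((rep ++ [m - rep.sum]).length : Int)) (by exact_mod_cast hk)
    have hmodlt := PySem.Int.mod_lt ((j : Int) - 1)
      (b := ((rep ++ [m - rep.sum]).length : Int)) (by exact_mod_cast hk)
    simp only [PySem.List.pyGetD_natCast, PySem.List.pySetD_natCast]
    rw [PySem.List.pySetD_of_nonneg _ _ hmodnn,
      PySem.List.pyGetD_eq_getElem _ _ hmodnn (by simpa using hmodlt)]
    simp only [pvUpd]
    have hgd : ((rep ++ [m - rep.sum]).set j ((rep ++ [m - rep.sum]).getD j 0 - 1)).getD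
        (PySem.Int.mod ((j : Int) - 1) ((rep ++ [m - rep.sum]).length : Int)).toNat 0
        = ((rep ++ [m - rep.sum]).set j ((rep ++ [m - rep.sum]).getD j 0 - 1))[
          (PySem.Int.mod ((j : Int) - 1) ((rep ++ [m - rep.sum]).length : Int)).toNat]'(by
            simp only [List.length_set]
            omega) :=
      List.getD_eq_getElem _ _ _
    rw [hgd]
  -- reduce B likewise
  have hB : parent_of_shorthand_alt rep m
      = (((pvUpd (rep ++ [m - rep.sum]) j) ++ (pvUpd (rep ++ [m - rep.sum]) j)).drop
          (pvBestStart ((pvUpd (rep ++ [m - rep.sum]) j) ++ (pvUpd (rep ++ [m - rep.sum]) j))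
            (rep ++ [m - rep.sum]).length 0 1)).take ((rep ++ [m - rep.sum]).length - 1) := by
    simp only [parent_of_shorthand_alt]
    rw [hj]
    simp only [pvUpd]
  set arr2 := pvUpd (rep ++ [m - rep.sum]) j with harr2
  have hlen2 : arr2.length = (rep ++ [m - rep.sum]).length := pvUpd_length _ _
  have hne2 : arr2 ≠ [] := by
    intro h
    rw [h] at hlen2
    simp at hlen2
  have hsum0 : (rep ++ [m - rep.sum]).sum = m := by simp
  have hsum2 : arr2.sum = m := by
    rw [harr2, pvUpd_sum _ _ hjk hk, hsum0]
  rw [hA, hB, ← hlen2, ← hsum2]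
  have hshort : pvToShorthand arr2 = arr2.dropLast := PySem.List.slice_to_neg_one arr2
  rw [hshort]
  exact pvRep_eq arr2 hne2
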